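-- pv_equiv track=rewrite | github.com/xinnnxuan/CPSC322-FinalProject | mysklearn/myevaluation.py | confusion_matrix_with_totals
-- ===== SOURCE A (Python) =====
-- def confusion_matrix_with_totals(y_true, y_pred, labels):
--     """Compute confusion matrix to evaluate the accuracy of a classification.
--
--     Args:
--         y_true(list of obj): The ground_truth target y values
--             The shape of y is n_samples
--         y_pred(list of obj): The predicted target y values (parallel to y_true)
--             The shape of y is n_samples
--         labels(list of str): The list of all possible target y labels used to index the matrix
--
--     Returns:
--         matrix(list of list of int): Confusion matrix whose i-th row and j-th column entry
--             indicates the number of samples with true label being i-th class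
--             and predicted label being j-th class
--
--     Notes:
--         Loosely based on sklearn's confusion_matrix():
--             https://scikit-learn.org/stable/modules/generated/sklearn.metrics.confusion_matrix.html
--     """
--     matrix = []
--     # create matrix full of 0s
--     for i, val in enumerate(labels):
--         row = [0 for _ in range(len(labels))]
--         matrix.append(row)
--
--     for i, val in enumerate(y_true):
--         matrix[labels.index(y_true[i])][labels.index(y_pred[i])] += 1
--
--     # calculate and append row and col totals
--     row_totals, col_totals = calculate_totals(matrix, labels)
--     for i, row in enumerate(matrix):
--         row.append(row_totals[i])
--     matrix.append(col_totals)
--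
--     # append total
--     total = sum(row_totals)
--     matrix[len(matrix) - 1].append(total)
--
--     return matrix
--
-- def calculate_totals(matrix, labels):
--     row_totals = []
--     col_totals = [0 for _ in range(len(labels))]
--     # calculate row totals
--     for row in matrix:
--         row_totals.append(sum(row))
--     # calculate column totals
--     for i, row in enumerate(matrix):
--         for j, val in enumerate(row):
--             col_totals[j] += row[j]
--     return row_totals, col_totals
-- ===== SOURCE B (Python) =====
-- def confusion_matrix_with_totals(y_true, y_pred, labels):
--     """Confusion matrix with appended row/col totals: single fused pass.
--
--     Totals are accumulated while the matrix is filled (no separate rescan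
--     of the matrix, no helper); each row is built with L+1 slots so the row
--     total lives in its last cell from the start.
--     """
--     L = len(labels)
--     counts = [[0] * (L + 1) for _ in range(L)]
--     col = [0] * (L + 1)
--     n = 0
--     for k in range(len(y_true)):
--         i = labels.index(y_true[k])
--         j = labels.index(y_pred[k])
--         counts[i][j] += 1
--         counts[i][L] += 1
--         col[j] += 1
--         n += 1
--     col[L] = n
--     counts.append(col)
--     return counts
-- ===== Notes on version B (the rewrite author's own statement) =====
-- stated objective: alternative
-- what changed: Single fused pass: rows are built with L+1 slots and row/column/grand totals are accumulated while the matrix is filled, replacing A's fill-then-rescan decomposition (calculate_totals helper re-scanning the whole matrix cell by cell, then a per-row append pass).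
import Mathlib
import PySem

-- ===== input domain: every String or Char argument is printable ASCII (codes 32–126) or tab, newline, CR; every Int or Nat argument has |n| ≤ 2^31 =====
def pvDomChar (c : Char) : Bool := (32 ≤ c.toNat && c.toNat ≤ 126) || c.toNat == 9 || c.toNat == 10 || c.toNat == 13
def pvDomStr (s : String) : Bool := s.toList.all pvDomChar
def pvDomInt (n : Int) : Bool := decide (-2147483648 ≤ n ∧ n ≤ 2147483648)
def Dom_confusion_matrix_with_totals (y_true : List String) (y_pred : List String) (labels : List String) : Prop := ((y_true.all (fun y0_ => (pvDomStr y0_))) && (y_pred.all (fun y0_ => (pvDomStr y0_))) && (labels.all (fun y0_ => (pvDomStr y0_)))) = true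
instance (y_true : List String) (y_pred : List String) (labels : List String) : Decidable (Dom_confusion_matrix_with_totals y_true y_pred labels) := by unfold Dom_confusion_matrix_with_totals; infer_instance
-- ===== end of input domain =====

-- B replaces A's fill-then-rescan decomposition by one fused pass that accumulates
-- row/column/grand totals while filling (no cell-by-cell rescan of the matrix and no
-- per-row append pass; objective: alternative decomposition).
-- ===== PORT A =====
-- helper calculate_totals: row sums, then a nested rescan accumulating column sums.
-- (the 'col_totals[j] += row[j]' update: index j comes from enumerate, so it is a
-- nonnegative in-range index whenever the row is no longer than col_totals, which is
-- always the case for the L×L matrix A passes in; List.modify is exact there)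
def pvCalcTotals (matrix : List (List Int)) (labels : List String) : List Int × List Int :=
  let row_totals := matrix.foldl (fun acc row => acc ++ [row.sum]) ([] : List Int)
  let col_totals := List.replicate labels.length (0 : Int)
  let col_totals := matrix.foldl
    (fun ct row => (PySem.List.enumerate row).foldl
      (fun ct2 jv => ct2.modify jv.1.toNat (· + jv.2)) ct) col_totals
  (row_totals, col_totals)

def confusion_matrix_with_totals (y_true : List String) (y_pred : List String) (labels : List String) : List (List Int) :=
  -- create matrix full of 0s
  let matrix : List (List Int) :=
    (PySem.List.enumerate labels).foldl
      (fun m _ => m ++ [List.replicate labels.length (0 : Int)]) []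
  -- fill: matrix[labels.index(y_true[i])][labels.index(y_pred[i])] += 1
  -- (none = ValueError/IndexError in Python; those inputs are outside Pre_)
  let matrix :=
    (PySem.List.enumerate y_true).foldl
      (fun m iv =>
        match PySem.List.index? labels (PySem.List.pyGetD y_true iv.1 ""),
              PySem.List.index? labels (PySem.List.pyGetD y_pred iv.1 "") with
        | some i, some j => m.modify i (fun row => row.modify j (· + 1))
        | _, _ => m) matrix
  -- append row totals to each row, append col_totals row
  let rc := pvCalcTotals matrix labels
  let matrix2 :=
    (PySem.List.enumerate matrix).foldl
      (fun m ir => m ++ [ir.2 ++ [PySem.List.pyGetD rc.1 ir.1 0]]) []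
  let matrix3 := matrix2 ++ [rc.2]
  -- matrix[len(matrix)-1].append(total)
  matrix3.modify (matrix3.length - 1) (fun row => row ++ [rc.1.sum])

-- ===== PORT B =====
def confusion_matrix_with_totals_alt (y_true : List String) (y_pred : List String) (labels : List String) : List (List Int) :=
  let L := labels.length
  let init : List (List Int) × List Int × Int :=
    (List.replicate L (List.replicate (L + 1) (0 : Int)), List.replicate (L + 1) (0 : Int), 0)
  let st :=
    (PySem.List.pyRange 0 (y_true.length : Int) 1).foldl
      (fun (st : List (List Int) × List Int × Int) k =>
        -- i = labels.index(y_true[k]); j = labels.index(y_pred[k])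
        -- (none = ValueError/IndexError in Python; outside Pre_ nothing is claimed)
        let i := (PySem.List.index? labels (PySem.List.pyGetD y_true k "")).getD 0
        let j := (PySem.List.index? labels (PySem.List.pyGetD y_pred k "")).getD 0
        (st.1.modify i (fun row => (row.modify j (· + 1)).modify L (· + 1)),
         st.2.1.modify j (· + 1), st.2.2 + 1)) init
  st.1 ++ [st.2.1.set L st.2.2]

-- ===== PRECONDITION & SPEC =====
-- Pre_ excludes exactly the inputs where the Python raises: y_pred shorter than
-- y_true (IndexError) or a consumed label missing from labels (ValueError).
def Pre_confusion_matrix_with_totals (y_true : List String) (y_pred : List String) (labels : List String) : Prop :=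
  y_true.length ≤ y_pred.length ∧ (∀ t ∈ y_true, t ∈ labels) ∧
    (∀ p ∈ y_pred.take y_true.length, p ∈ labels)
instance (y_true : List String) (y_pred : List String) (labels : List String) : Decidable (Pre_confusion_matrix_with_totals y_true y_pred labels) := by unfold Pre_confusion_matrix_with_totals; infer_instance

def pvWitness_confusion_matrix_with_totals : List String × List String × List String :=
  (["a", "b", "a"], ["b", "b", "a"], ["a", "b"])

def Spec_confusion_matrix_with_totals (y_true : List String) (y_pred : List String) (labels : List String) (out : List (List Int)) : Prop := out = confusion_matrix_with_totals_alt y_true y_pred labels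
instance (y_true : List String) (y_pred : List String) (labels : List String) (out : List (List Int)) : Decidable (Spec_confusion_matrix_with_totals y_true y_pred labels out) := by unfold Spec_confusion_matrix_with_totals; infer_instance

-- ===== CLAIM (what is proved, stated in full; the proofs are below) =====
def Claim_equal_confusion_matrix_with_totals : Prop := ∀ (y_true : List String) (y_pred : List String) (labels : List String), Dom_confusion_matrix_with_totals y_true y_pred labels → Pre_confusion_matrix_with_totals y_true y_pred labels → Spec_confusion_matrix_with_totals y_true y_pred labels (confusion_matrix_with_totals y_true y_pred labels)

-- ===== LEMMAS AND PROOFS =====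

-- generic small lemmas
lemma pvModifyAppendLeft {α : Type} (l t : List α) (i : Nat) (f : α → α) (h : i < l.length) :
    (l ++ t).modify i f = l.modify i f ++ t := by
  apply List.ext_getElem
  · simp
  · intro k h1 h2
    simp only [List.getElem_modify]
    by_cases hk : k < l.length
    · rw [List.getElem_append_left hk, List.getElem_append_left (by simpa using hk),
        List.getElem_modify]
    · have hik : i ≠ k := by omega
      rw [if_neg hik, List.getElem_append_right (by omega),
        List.getElem_append_right (by simp; omega)]
      simp

lemma pvModifyAppendLast {α : Type} (l : List α) (x : α) (f : α → α) :
    (l ++ [x]).modify l.length f = l ++ [f x] := by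
  induction l with
  | nil => simp [List.modify_cons]
  | cons a l ih => simp [ih]

lemma pvSetAppendLast {α : Type} (l : List α) (x y : α) :
    (l ++ [x]).set l.length y = l ++ [y] := by
  induction l with
  | nil => simp
  | cons a l ih => simp [ih]

lemma pvSumModify (r : List Int) (j : Nat) (h : j < r.length) :
    (r.modify j (· + 1)).sum = r.sum + 1 := by
  induction r generalizing j with
  | nil => simp at h
  | cons a r ih =>
    cases j with
    | zero => simp [List.modify_cons]; ring
    | succ j =>
      simp only [List.modify_cons, Nat.succ_ne_zero, if_false, Nat.add_sub_cancel, List.sum_cons]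
      rw [ih j (by simpa using h)]; ring

lemma pvZipModLeft (ct r : List Int) (j : Nat) (h : ct.length = r.length) :
    List.zipWith (· + ·) (ct.modify j (· + 1)) r = (List.zipWith (· + ·) ct r).modify j (· + 1) := by
  apply List.ext_getElem
  · simp [h]
  · intro k h1 h2
    simp only [List.getElem_modify, List.getElem_zipWith]
    split_ifs <;> ring

lemma pvZipModRight (ct r : List Int) (j : Nat) (h : ct.length = r.length) :
    List.zipWith (· + ·) ct (r.modify j (· + 1)) = (List.zipWith (· + ·) ct r).modify j (· + 1) := by
  apply List.ext_getElem
  · simp [h]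
  · intro k h1 h2
    simp only [List.getElem_modify, List.getElem_zipWith]
    split_ifs <;> ring

lemma pvMapModify {α β : Type} (M : List α) (i : Nat) (g : α → α) (f : α → β) (f' : β → β)
    (hc : ∀ r ∈ M, f (g r) = f' (f r)) :
    (M.modify i g).map f = (M.map f).modify i f' := by
  induction M generalizing i with
  | nil => simp
  | cons a M ih =>
    cases i with
    | zero => simp [List.modify_zero_cons, hc a (by simp)]
    | succ i =>
      simp only [List.modify_succ_cons, List.map_cons]
      rw [ih i (fun r hr => hc r (by simp [hr]))]

lemma pvSumMapModify (M : List (List Int)) (i : Nat) (g : List Int → List Int)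
    (hi : i < M.length) (hc : ∀ r ∈ M, (g r).sum = r.sum + 1) :
    ((M.modify i g).map List.sum).sum = (M.map List.sum).sum + 1 := by
  induction M generalizing i with
  | nil => simp at hi
  | cons a M ih =>
    cases i with
    | zero => simp [List.modify_zero_cons, hc a (by simp)]; ring
    | succ i =>
      simp only [List.modify_succ_cons, List.map_cons, List.sum_cons]
      rw [ih i (by simpa using hi) (fun r hr => hc r (by simp [hr]))]; ring

lemma pvForallMemModify {α : Type} (M : List α) (i : Nat) (g : α → α) (P : α → Prop)
    (hM : ∀ r ∈ M, P r) (hg : ∀ r, P r → P (g r)) : ∀ r ∈ M.modify i g, P r := by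
  induction M generalizing i with
  | nil => simp
  | cons a M ih =>
    cases i with
    | zero =>
      simp only [List.modify_zero_cons]
      intro r hr
      rcases List.mem_cons.mp hr with rfl | hr
      · exact hg a (hM a (by simp))
      · exact hM r (by simp [hr])
    | succ i =>
      simp only [List.modify_succ_cons]
      intro r hr
      rcases List.mem_cons.mp hr with rfl | hr
      · exact hM r (by simp)
      · exact ih i (fun r hr => hM r (by simp [hr])) r hr

-- length of the running column-sum fold
lemma pvZFLength (L : Nat) : ∀ (M : List (List Int)) (ct : List Int),
    (∀ r ∈ M, r.length = L) → ct.length = L →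
    (M.foldl (fun ct r => List.zipWith (· + ·) ct r) ct).length = L := by
  intro M
  induction M with
  | nil => intro ct _ h; simpa using h
  | cons a M ih =>
    intro ct hM hct
    simp only [List.foldl_cons]
    exact ih _ (fun r hr => hM r (by simp [hr]))
      (by simp [hct, hM a (by simp)])

lemma pvZFModAcc (L : Nat) : ∀ (M : List (List Int)) (ct : List Int) (j : Nat),
    (∀ r ∈ M, r.length = L) → ct.length = L →
    M.foldl (fun ct r => List.zipWith (· + ·) ct r) (ct.modify j (· + 1))
      = (M.foldl (fun ct r => List.zipWith (· + ·) ct r) ct).modify j (· + 1) := by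
  intro M
  induction M with
  | nil => simp
  | cons a M ih =>
    intro ct j hM hct
    simp only [List.foldl_cons]
    rw [pvZipModLeft _ _ _ (by rw [hct, hM a (by simp)]),
      ih _ j (fun r hr => hM r (by simp [hr])) (by simp [hct, hM a (by simp)])]

lemma pvZFModRow (L : Nat) : ∀ (M : List (List Int)) (i : Nat) (ct : List Int) (j : Nat),
    i < M.length → (∀ r ∈ M, r.length = L) → ct.length = L →
    (M.modify i (fun r => r.modify j (· + 1))).foldl (fun ct r => List.zipWith (· + ·) ct r) ct
      = (M.foldl (fun ct r => List.zipWith (· + ·) ct r) ct).modify j (· + 1) := by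
  intro M
  induction M with
  | nil => intro i ct j hi; simp at hi
  | cons a M ih =>
    intro i ct j hi hM hct
    cases i with
    | zero =>
      simp only [List.modify_zero_cons, List.foldl_cons]
      rw [pvZipModRight ct a j (by rw [hct, hM a (by simp)]),
        pvZFModAcc L M _ j (fun r hr => hM r (by simp [hr])) (by simp [hct, hM a (by simp)])]
    | succ i =>
      simp only [List.modify_succ_cons, List.foldl_cons]
      exact ih i _ j (by simpa using hi) (fun r hr => hM r (by simp [hr]))
        (by simp [hct, hM a (by simp)])

-- the inner 'col_totals[j] += row[j]' fold of calculate_totals is a pointwise zipWith add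
lemma pvInnerShift : ∀ (row : List Int) (s : Int), 0 ≤ s → ∀ (c : Int) (ct : List Int),
    (PySem.List.enumerate row (s + 1)).foldl (fun ct2 jv => ct2.modify jv.1.toNat (· + jv.2)) (c :: ct)
      = c :: (PySem.List.enumerate row s).foldl (fun ct2 jv => ct2.modify jv.1.toNat (· + jv.2)) ct := by
  intro row
  induction row with
  | nil => simp [PySem.List.enumerate]
  | cons x xs ih =>
    intro s hs c ct
    rw [PySem.List.enumerate_cons, PySem.List.enumerate_cons]
    simp only [List.foldl_cons]
    have h1 : (s + 1).toNat = s.toNat + 1 := by omega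
    have h2 : (c :: ct).modify (s.toNat + 1) (· + x) = c :: ct.modify s.toNat (· + x) :=
      List.modify_succ_cons ..
    rw [h1, h2]
    exact ih (s + 1) (by omega) c (ct.modify s.toNat (· + x))

lemma pvInnerCol : ∀ (row ct : List Int), row.length = ct.length →
    (PySem.List.enumerate row).foldl (fun ct2 jv => ct2.modify jv.1.toNat (· + jv.2)) ct
      = List.zipWith (· + ·) ct row := by
  intro row
  induction row with
  | nil =>
    intro ct h
    cases ct
    · simp [PySem.List.enumerate]
    · simp at h
  | cons x xs ih =>
    intro ct h
    cases ct with
    | nil => simp at h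
    | cons c ct =>
      rw [PySem.List.enumerate_cons]
      simp only [List.foldl_cons, List.zipWith_cons_cons]
      have h0 : ((0 : Int)).toNat = 0 := rfl
      rw [h0, List.modify_zero_cons]
      rw [pvInnerShift xs 0 le_rfl (c + x) ct]
      rw [ih ct (by simpa using h)]

-- the outer fold of calculate_totals, row by row
lemma pvColFold (L : Nat) : ∀ (M : List (List Int)) (ct : List Int),
    (∀ r ∈ M, r.length = L) → ct.length = L →
    M.foldl (fun ct row => (PySem.List.enumerate row).foldl
        (fun ct2 jv => ct2.modify jv.1.toNat (· + jv.2)) ct) ct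
      = M.foldl (fun ct r => List.zipWith (· + ·) ct r) ct := by
  intro M
  induction M with
  | nil => simp
  | cons a M ih =>
    intro ct hM hct
    simp only [List.foldl_cons]
    rw [pvInnerCol a ct (by rw [hct, hM a (by simp)])]
    exact ih _ (fun r hr => hM r (by simp [hr])) (by simp [hct, hM a (by simp)])

-- one fill step on a row carrying its running total in the last slot
lemma pvRowStep (L j : Nat) (r : List Int) (hr : r.length = L) (hj : j < L) :
    ((r ++ [r.sum]).modify j (· + 1)).modify L (· + 1)
      = (r.modify j (· + 1)) ++ [(r.modify j (· + 1)).sum] := by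
  rw [pvModifyAppendLeft r [r.sum] j _ (by omega)]
  rw [show L = (r.modify j (· + 1)).length by simp [hr]]
  rw [pvModifyAppendLast, pvSumModify r j (by omega)]

-- main loop: B's fused state tracks A's plain matrix
lemma pvLoop (y_true y_pred labels : List String) :
    ∀ (l : List (Int × String)) (M : List (List Int)),
    (∀ iv ∈ l, (PySem.List.index? labels (PySem.List.pyGetD y_true iv.1 "")).isSome = true ∧
        (PySem.List.index? labels (PySem.List.pyGetD y_pred iv.1 "")).isSome = true) →
    M.length = labels.length → (∀ r ∈ M, r.length = labels.length) →
    (List.foldl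
      (fun (st : List (List Int) × List Int × Int) (iv : Int × String) =>
        let i := (PySem.List.index? labels (PySem.List.pyGetD y_true iv.1 "")).getD 0
        let j := (PySem.List.index? labels (PySem.List.pyGetD y_pred iv.1 "")).getD 0
        (st.1.modify i (fun row => (row.modify j (· + 1)).modify labels.length (· + 1)),
         st.2.1.modify j (· + 1), st.2.2 + 1))
      (M.map (fun r => r ++ [r.sum]),
       (M.foldl (fun ct r => List.zipWith (· + ·) ct r) (List.replicate labels.length 0)) ++ [0],
       (M.map List.sum).sum) l
      = (let M' := List.foldl
          (fun m (iv : Int × String) =>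
            match PySem.List.index? labels (PySem.List.pyGetD y_true iv.1 ""),
                  PySem.List.index? labels (PySem.List.pyGetD y_pred iv.1 "") with
            | some i, some j => m.modify i (fun row => row.modify j (· + 1))
            | _, _ => m) M l
         (M'.map (fun r => r ++ [r.sum]),
          (M'.foldl (fun ct r => List.zipWith (· + ·) ct r) (List.replicate labels.length 0)) ++ [0],
          (M'.map List.sum).sum)))
    ∧ (List.foldl
        (fun m (iv : Int × String) =>
          match PySem.List.index? labels (PySem.List.pyGetD y_true iv.1 ""),
                PySem.List.index? labels (PySem.List.pyGetD y_pred iv.1 "") with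
          | some i, some j => m.modify i (fun row => row.modify j (· + 1))
          | _, _ => m) M l).length = labels.length
    ∧ (∀ r ∈ (List.foldl
        (fun m (iv : Int × String) =>
          match PySem.List.index? labels (PySem.List.pyGetD y_true iv.1 ""),
                PySem.List.index? labels (PySem.List.pyGetD y_pred iv.1 "") with
          | some i, some j => m.modify i (fun row => row.modify j (· + 1))
          | _, _ => m) M l), r.length = labels.length) := by
  intro l
  induction l with
  | nil => intro M _ h1 h2; exact ⟨rfl, h1, h2⟩
  | cons a l ih =>
    intro M hl h1 h2
    obtain ⟨ha1, ha2⟩ := hl a (List.mem_cons_self ..)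
    have hl' : ∀ iv ∈ l, (PySem.List.index? labels (PySem.List.pyGetD y_true iv.1 "")).isSome = true ∧
        (PySem.List.index? labels (PySem.List.pyGetD y_pred iv.1 "")).isSome = true :=
      fun iv hiv => hl iv (List.mem_cons_of_mem a hiv)
    simp only [List.foldl_cons]
    rcases hq : PySem.List.index? labels (PySem.List.pyGetD y_true a.1 "") with _ | i
    · rw [hq] at ha1; simp at ha1
    rcases hp : PySem.List.index? labels (PySem.List.pyGetD y_pred a.1 "") with _ | j
    · rw [hp] at ha2; simp at ha2
    -- both labels found: i, j < labels.length
    obtain ⟨hiL, -, -⟩ := PySem.List.getElem_of_index?_eq_some hq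
    obtain ⟨hjL, -, -⟩ := PySem.List.getElem_of_index?_eq_some hp
    simp only [Option.getD_some]
    set M' := M.modify i (fun row => row.modify j (· + 1)) with hM'
    have hlen : M'.length = labels.length := by simp [hM', h1]
    have hrows : ∀ r ∈ M', r.length = labels.length :=
      pvForallMemModify M i _ _ h2 (fun r hr => by simpa using hr)
    have hmap : (M.map (fun r => r ++ [r.sum])).modify i
        (fun row => (row.modify j (· + 1)).modify labels.length (· + 1))
          = M'.map (fun r => r ++ [r.sum]) := by
      rw [hM', pvMapModify M i _ _ _ ?_]
      intro r hr
      exact (pvRowStep labels.length j r (h2 r hr) hjL).symm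
    have hcol : ((M.foldl (fun ct r => List.zipWith (· + ·) ct r)
        (List.replicate labels.length 0)) ++ [0]).modify j (· + 1)
          = (M'.foldl (fun ct r => List.zipWith (· + ·) ct r)
              (List.replicate labels.length 0)) ++ [0] := by
      rw [pvModifyAppendLeft _ _ j _ (by
        rw [pvZFLength labels.length M _ h2 (by simp)]; exact hjL)]
      rw [hM', pvZFModRow labels.length M i _ j (by omega) h2 (by simp)]
    have hsum : (M.map List.sum).sum + 1 = (M'.map List.sum).sum := by
      rw [hM', pvSumMapModify M i _ (by omega)
        (fun r hr => pvSumModify r j (by rw [h2 r hr]; exact hjL))]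
    rw [hmap, hcol, hsum]
    exact ih M' hl' hlen hrows

lemma pvZFZero (L : Nat) : ∀ (k : Nat),
    (List.replicate k (List.replicate L (0 : Int))).foldl
      (fun ct r => List.zipWith (· + ·) ct r) (List.replicate L 0) = List.replicate L 0 := by
  intro k
  induction k with
  | zero => simp
  | succ k ih =>
    rw [List.replicate_succ, List.foldl_cons, List.zipWith_replicate]
    simpa using ih


-- ===== VERDICT (by name: the statement is the Claim_ definition above) =====
theorem confusion_matrix_with_totals_spec : Claim_equal_confusion_matrix_with_totals := by
  intro y_true y_pred labels _hdom _hpre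
  unfold Spec_confusion_matrix_with_totals
  unfold confusion_matrix_with_totals confusion_matrix_with_totals_alt pvCalcTotals
  -- name the matrix-fill step and initial matrix
  dsimp only
  have h0 : List.foldl (fun (m : List (List Int)) (_ : Int × String) => m ++ [List.replicate labels.length (0:Int)]) [] (PySem.List.enumerate labels)
      = List.replicate labels.length (List.replicate labels.length 0) := by
    rw [PySem.List.foldl_append_singleton_eq_map (fun _ => List.replicate labels.length (0:Int))]
    simp [PySem.List.length_enumerate]
  rw [h0]
  set Ms := List.foldl
      (fun (m : List (List Int)) (iv : Int × String) =>
        match PySem.List.index? labels (PySem.List.pyGetD y_true iv.1 ""),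
              PySem.List.index? labels (PySem.List.pyGetD y_pred iv.1 "") with
        | some i, some j => m.modify i (fun row => row.modify j (· + 1))
        | _, _ => m)
      (List.replicate labels.length (List.replicate labels.length 0))
      (PySem.List.enumerate y_true) with hMs
  obtain ⟨hnp, htl, hpl⟩ := _hpre
  have hl : ∀ iv ∈ PySem.List.enumerate y_true 0,
      (PySem.List.index? labels (PySem.List.pyGetD y_true iv.1 "")).isSome = true ∧
      (PySem.List.index? labels (PySem.List.pyGetD y_pred iv.1 "")).isSome = true := by
    intro iv hiv
    obtain ⟨k, hk, rfl⟩ := (PySem.List.mem_enumerate_iff y_true 0 iv).mp hiv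
    constructor
    · rw [PySem.List.index?_isSome_iff]
      rw [zero_add, PySem.List.pyGetD_natCast, List.getD_eq_getElem?_getD]
      simp only [List.getElem?_eq_getElem hk, Option.getD_some]
      exact htl _ (List.getElem_mem hk)
    · rw [PySem.List.index?_isSome_iff]
      have hk' : k < y_pred.length := lt_of_lt_of_le hk hnp
      rw [zero_add, PySem.List.pyGetD_natCast, List.getD_eq_getElem?_getD]
      simp only [List.getElem?_eq_getElem hk', Option.getD_some]
      refine hpl _ ?_
      rw [List.mem_take_iff_getElem]
      exact ⟨k, by omega, by simp⟩
  have hloop := pvLoop y_true y_pred labels (PySem.List.enumerate y_true)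
      (List.replicate labels.length (List.replicate labels.length 0))
      hl (by simp) (by intro r hr; simp [List.eq_of_mem_replicate hr])
  rw [← hMs] at hloop
  obtain ⟨hfold, hlen, hrows⟩ := hloop
  -- A's calculate_totals on the filled matrix
  have hrt : List.foldl (fun (acc : List Int) (row : List Int) => acc ++ [row.sum]) [] Ms
      = Ms.map List.sum := by
    rw [PySem.List.foldl_append_singleton_eq_map List.sum Ms []]; simp
  have hct : List.foldl
      (fun ct row => List.foldl (fun (ct2 : List Int) (jv : Int × Int) => ct2.modify jv.1.toNat (· + jv.2)) ct (PySem.List.enumerate row))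
      (List.replicate labels.length 0) Ms
      = Ms.foldl (fun ct r => List.zipWith (· + ·) ct r) (List.replicate labels.length 0) :=
    pvColFold labels.length Ms _ hrows (by simp)
  rw [hrt, hct]
  have hm2 : List.foldl (fun (m : List (List Int)) (ir : Int × List Int) =>
      m ++ [ir.2 ++ [PySem.List.pyGetD (List.map List.sum Ms) ir.1 0]]) [] (PySem.List.enumerate Ms)
      = Ms.map (fun r => r ++ [r.sum]) := by
    rw [PySem.List.foldl_congr_mem (PySem.List.enumerate Ms) _
      (fun (m : List (List Int)) (ir : Int × List Int) => m ++ [ir.2 ++ [ir.2.sum]]) []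
      (by
        intro acc x hx
        obtain ⟨k, hk, rfl⟩ := (PySem.List.mem_enumerate_iff Ms 0 x).mp hx
        simp [PySem.List.pyGetD_natCast, List.getD_eq_getElem?_getD, hk])]
    rw [PySem.List.foldl_append_singleton_eq_map (fun (ir : Int × List Int) => ir.2 ++ [ir.2.sum])]
    simp only [List.nil_append]
    rw [show (fun (ir : Int × List Int) => ir.2 ++ [ir.2.sum])
        = ((fun r : List Int => r ++ [r.sum]) ∘ (fun x : Int × List Int => x.2)) from rfl,
      ← List.map_map, PySem.List.map_snd_enumerate]
  rw [hm2]
  -- LHS: the final matrix[-1].append(total)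
  have hidx : (List.map (fun r : List Int => r ++ [r.sum]) Ms ++
      [List.foldl (fun ct r => List.zipWith (· + ·) ct r) (List.replicate labels.length 0) Ms]).length - 1
      = (List.map (fun r : List Int => r ++ [r.sum]) Ms).length := by simp
  rw [hidx, pvModifyAppendLast]
  -- RHS: B's range loop as a fold over enumerate y_true
  have hr1 : PySem.List.pyRange 0 (↑y_true.length) = List.map (fun x : Int × String => x.1) (PySem.List.enumerate y_true 0) := by
    have h := PySem.List.map_fst_enumerate y_true 0
    rw [zero_add] at h
    exact h.symm
  rw [hr1, List.foldl_map]
  -- B's initial fused state is the invariant image of the all-zero matrix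
  have hinit : (List.replicate labels.length (List.replicate (labels.length + 1) (0 : Int)),
      List.replicate (labels.length + 1) (0 : Int), (0 : Int))
      = (List.map (fun r : List Int => r ++ [r.sum]) (List.replicate labels.length (List.replicate labels.length 0)),
         List.foldl (fun ct r => List.zipWith (· + ·) ct r) (List.replicate labels.length 0)
           (List.replicate labels.length (List.replicate labels.length 0)) ++ [0],
         (List.map List.sum (List.replicate labels.length (List.replicate labels.length 0))).sum) := by
    rw [pvZFZero labels.length labels.length]
    simp [← List.replicate_succ']
  rw [hinit]
  rw [hfold]
  dsimp only
  -- set at the last slot of the totals row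
  have hset : (List.foldl (fun ct r => List.zipWith (· + ·) ct r)
      (List.replicate labels.length 0) Ms ++ [0]).set labels.length
        (List.map List.sum Ms).sum
      = List.foldl (fun ct r => List.zipWith (· + ·) ct r)
          (List.replicate labels.length 0) Ms ++ [(List.map List.sum Ms).sum] := by
    set Z := List.foldl (fun ct r => List.zipWith (· + ·) ct r)
      (List.replicate labels.length 0) Ms with hZ
    rw [show labels.length = Z.length from
      (pvZFLength labels.length Ms _ hrows (by simp)).symm]
    exact pvSetAppendLast _ _ _
  rw [hset]
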